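-- pv_equiv track=rewrite | github.com/erpplaneacion-eng/ERP_CHVS | erp_chvs/nutricion/utils/orden_componentes.py | sort_preparaciones_dicts
-- ===== SOURCE A (Python) =====
-- ORDEN_COMPONENTES_POR_MODALIDAD = {
--     # COMPLEMENTO AM/PM PREPARADO  y  COMPLEMENTO PM PREPARADO
--     '20501': ['com1', 'com2', 'com3','com12', 'com4', 'com5', 'com6', 'com15'],
--     '20507': ['com1', 'com2', 'com3','com12', 'com4', 'com5', 'com6', 'com15'],
--
--     # COMPLEMENTO AM/PM INDUSTRIALIZADO  y  REFUERZO COMPLEMENTO AM/PM INDUSTRIALIZADO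
--     '20502':  ['com11', 'com3', 'com12', 'com13', 'com18'],
--     '020511': ['com11', 'com3', 'com12', 'com13', 'com18'],
--
--     # COMPLEMENTO AM/PM JORNADA UNICA  y  REFUERZO COMPLEMENTO AM/PM PREPARADO
--     '20503': ['com2', 'com7','com3', 'com8', 'com9', 'com11', 'com14', 'com5', 'com6', 'com15'],
--     '20510': ['com2', 'com7','com3', 'com8', 'com9', 'com11', 'com14', 'com5', 'com6', 'com15'],
-- }
--
-- def _indice_componente(componente_id, modalidad_id):
--     """Retorna la posición del componente en el orden definido para la modalidad.
--     Si la modalidad no tiene orden, retorna 999.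
--     """
--     orden = ORDEN_COMPONENTES_POR_MODALIDAD.get(str(modalidad_id or ''), [])
--     try:
--         return orden.index(str(componente_id or ''))
--     except ValueError:
--         return 999
--
-- def sort_preparaciones_dicts(preparaciones, modalidad_id):
--     """Ordena una lista de dicts de preparaciones por componente según la
--     modalidad. Cada dict debe tener 'id_componente_id' y 'nombre'.
--     Si la modalidad tiene un orden definido, omite las preparaciones cuyo
--     componente no esté en dicho orden.
--     """
--     orden_definido = ORDEN_COMPONENTES_POR_MODALIDAD.get(str(modalidad_id or ''))
--
--     if orden_definido is not None:
--         preparaciones = [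
--             p for p in preparaciones
--             if str(p.get('id_componente_id', '') or '') in orden_definido
--         ]
--
--     return sorted(
--         preparaciones,
--         key=lambda p: (
--             _indice_componente(p.get('id_componente_id', ''), modalidad_id),
--             (p.get('nombre') or '').lower(),
--         ),
--     )
-- ===== SOURCE B (Python) =====
-- # B: instead of one sorted() with a composite (index, name) key, walk the modality's
-- # component-order list and concatenate per-component buckets, each sorted by name only.
-- ORDEN_COMPONENTES_POR_MODALIDAD = {
--     '20501': ['com1', 'com2', 'com3','com12', 'com4', 'com5', 'com6', 'com15'],
--     '20507': ['com1', 'com2', 'com3','com12', 'com4', 'com5', 'com6', 'com15'],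
--     '20502':  ['com11', 'com3', 'com12', 'com13', 'com18'],
--     '020511': ['com11', 'com3', 'com12', 'com13', 'com18'],
--     '20503': ['com2', 'com7','com3', 'com8', 'com9', 'com11', 'com14', 'com5', 'com6', 'com15'],
--     '20510': ['com2', 'com7','com3', 'com8', 'com9', 'com11', 'com14', 'com5', 'com6', 'com15'],
-- }
--
-- def sort_preparaciones_dicts(preparaciones, modalidad_id):
--     nombre = lambda p: (p.get('nombre') or '').lower()
--     orden = ORDEN_COMPONENTES_POR_MODALIDAD.get(str(modalidad_id or ''))
--     if orden is None:
--         return sorted(preparaciones, key=nombre)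
--     out = []
--     for cid in orden:
--         bucket = [p for p in preparaciones
--                   if str(p.get('id_componente_id', '') or '') == cid]
--         bucket.sort(key=nombre)
--         out += bucket
--     return out
-- ===== Notes on version B (the rewrite author's own statement) =====
-- stated objective: alternative
-- what changed: Replaces the single comparison sort with a composite (order-index, name) key by iterating the modality's order list and concatenating per-component buckets each sorted by name only (falling back to a plain name sort when the modality has no defined order).
import Mathlib
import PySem

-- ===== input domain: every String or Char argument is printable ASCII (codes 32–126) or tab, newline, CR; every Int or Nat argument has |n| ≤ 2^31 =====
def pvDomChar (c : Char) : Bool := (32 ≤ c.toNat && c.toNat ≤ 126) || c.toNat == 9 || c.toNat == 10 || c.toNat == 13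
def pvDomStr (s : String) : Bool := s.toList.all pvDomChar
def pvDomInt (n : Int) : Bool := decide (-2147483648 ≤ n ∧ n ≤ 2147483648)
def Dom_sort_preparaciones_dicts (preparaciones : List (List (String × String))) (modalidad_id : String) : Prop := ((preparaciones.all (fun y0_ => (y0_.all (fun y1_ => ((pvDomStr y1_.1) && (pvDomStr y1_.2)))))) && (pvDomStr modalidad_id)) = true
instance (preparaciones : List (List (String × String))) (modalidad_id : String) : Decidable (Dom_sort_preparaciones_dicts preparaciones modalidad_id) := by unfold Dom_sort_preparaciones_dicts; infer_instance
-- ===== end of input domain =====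

-- B replaces A's single comparison sort with composite (order-index, name) key by
-- concatenating per-component buckets sorted by name only (objective: alternative decomposition).

-- ===== PORT A =====

-- Python `s or ''` on a str value
def pvOrStr (s : String) : String := if s == "" then "" else s

def ORDEN_COMPONENTES_POR_MODALIDAD : PySem.Dict String (List String) :=
  ⟨[("20501", ["com1", "com2", "com3", "com12", "com4", "com5", "com6", "com15"]),
    ("20507", ["com1", "com2", "com3", "com12", "com4", "com5", "com6", "com15"]),
    ("20502", ["com11", "com3", "com12", "com13", "com18"]),
    ("020511", ["com11", "com3", "com12", "com13", "com18"]),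
    ("20503", ["com2", "com7", "com3", "com8", "com9", "com11", "com14", "com5", "com6", "com15"]),
    ("20510", ["com2", "com7", "com3", "com8", "com9", "com11", "com14", "com5", "com6", "com15"])]⟩

def indice_componente (componente_id modalidad_id : String) : Int :=
  let orden := PySem.Dict.getD ORDEN_COMPONENTES_POR_MODALIDAD (pvOrStr modalidad_id) []
  match PySem.List.index? orden (pvOrStr componente_id) with
  | some i => (i : Int)
  | none => 999

-- key component `(p.get('nombre') or '').lower()`
def nombreKeyA (p : List (String × String)) : String :=
  PySem.Str.lower (match PySem.Dict.get? (PySem.Dict.mk p) "nombre" with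
                   | none => ""
                   | some s => pvOrStr s)

def sort_preparaciones_dicts (preparaciones : List (List (String × String))) (modalidad_id : String) : List (List (String × String)) :=
  let orden_definido := PySem.Dict.get? ORDEN_COMPONENTES_POR_MODALIDAD (pvOrStr modalidad_id)
  let preparaciones' :=
    match orden_definido with
    | some orden =>
        preparaciones.filter (fun p =>
          orden.contains (pvOrStr (PySem.Dict.getD (PySem.Dict.mk p) "id_componente_id" "")))
    | none => preparaciones
  PySem.List.sorted2 preparaciones'
    (fun p => indice_componente (PySem.Dict.getD (PySem.Dict.mk p) "id_componente_id" "") modalidad_id)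
    nombreKeyA

-- ===== PORT B =====

def nombreKeyB (p : List (String × String)) : String :=
  PySem.Str.lower (match PySem.Dict.get? (PySem.Dict.mk p) "nombre" with
                   | none => ""
                   | some s => pvOrStr s)

def compKeyB (p : List (String × String)) : String :=
  pvOrStr (PySem.Dict.getD (PySem.Dict.mk p) "id_componente_id" "")

def sort_preparaciones_dicts_alt (preparaciones : List (List (String × String))) (modalidad_id : String) : List (List (String × String)) :=
  match PySem.Dict.get? ORDEN_COMPONENTES_POR_MODALIDAD (pvOrStr modalidad_id) with
  | none => PySem.List.sorted preparaciones nombreKeyB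
  | some orden =>
      orden.foldl
        (fun out cid =>
          out ++ PySem.List.sorted (preparaciones.filter (fun p => compKeyB p == cid)) nombreKeyB)
        []

-- ===== PRECONDITION & SPEC =====
def Spec_sort_preparaciones_dicts (preparaciones : List (List (String × String))) (modalidad_id : String) (out : List (List (String × String))) : Prop := out = sort_preparaciones_dicts_alt preparaciones modalidad_id
instance (preparaciones : List (List (String × String))) (modalidad_id : String) (out : List (List (String × String))) : Decidable (Spec_sort_preparaciones_dicts preparaciones modalidad_id out) := by unfold Spec_sort_preparaciones_dicts; infer_instance

-- ===== CLAIM (what is proved, stated in full; the proofs are below) =====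
def Claim_equal_sort_preparaciones_dicts : Prop := ∀ (preparaciones : List (List (String × String))) (modalidad_id : String), Dom_sort_preparaciones_dicts preparaciones modalidad_id → Spec_sort_preparaciones_dicts preparaciones modalidad_id (sort_preparaciones_dicts preparaciones modalidad_id)

-- ===== LEMMAS AND PROOFS =====

@[simp] theorem pvOrStr_eq (s : String) : pvOrStr s = s := by
  unfold pvOrStr; split <;> simp_all

theorem nombreKeyA_eq_B : nombreKeyA = nombreKeyB := rfl

-- the insertion-sort loop both PySem.List.sorted and PySem.List.sorted2 perform
def insFold {α : Type} (before : α → α → Bool) (xs : List α) : List α :=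
  List.foldl (fun acc x => PySem.List.insertBy before x acc) [] xs

-- Python's tuple comparison (k1, k2) for sorted2 (reverse = false)
def lt2 {α : Type} (k1 : α → Int) (k2 : α → String) (a b : α) : Bool :=
  decide (k1 a < k1 b) || (!decide (k1 b < k1 a) && decide (k2 a < k2 b))

theorem sorted2_eq_insFold {α : Type} (xs : List α) (k1 : α → Int) (k2 : α → String) :
    PySem.List.sorted2 xs k1 k2 = insFold (lt2 k1 k2) xs := rfl

theorem sorted_eq_insFold {α : Type} (xs : List α) (k : α → String) :
    PySem.List.sorted xs k = insFold (fun a b => decide (k a < k b)) xs :=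
  PySem.List.sorted_eq_foldl_insertBy xs k

theorem insFold_append_singleton {α : Type} (before : α → α → Bool) (xs : List α) (x : α) :
    insFold before (xs ++ [x]) = PySem.List.insertBy before x (insFold before xs) := by
  simp [insFold, List.foldl_append]

theorem mem_insFold {α : Type} (before : α → α → Bool) (xs : List α) (y : α) :
    y ∈ insFold before xs ↔ y ∈ xs := by
  induction xs using List.reverseRecOn with
  | nil => simp [insFold]
  | append_singleton ys x ih =>
      rw [insFold_append_singleton]
      simp [PySem.List.mem_insertBy, ih]
      tauto

theorem insertBy_append_of_all_before {α : Type} (before : α → α → Bool) (x : α)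
    (A B : List α) (h : ∀ b ∈ B, before x b = true) :
    PySem.List.insertBy before x (A ++ B) = PySem.List.insertBy before x A ++ B := by
  induction A with
  | nil =>
      cases B with
      | nil => simp
      | cons b bs => simp [PySem.List.insertBy, h b (by simp)]
  | cons a A' ih =>
      simp only [List.cons_append, PySem.List.insertBy]
      split <;> simp [ih]

theorem insertBy_append_of_all_not_before {α : Type} (before : α → α → Bool) (x : α)
    (A B : List α) (h : ∀ a ∈ A, before x a = false) :
    PySem.List.insertBy before x (A ++ B) = A ++ PySem.List.insertBy before x B := by
  induction A with
  | nil => simp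
  | cons a A' ih =>
      simp only [List.cons_append, PySem.List.insertBy, h a (by simp)]
      simp only [Bool.false_eq_true, if_false, List.cons.injEq, true_and]
      exact ih (fun a ha => h a (by simp [ha]))

theorem insertBy_congr {α : Type} (before before' : α → α → Bool) (x : α) (ys : List α)
    (h : ∀ b ∈ ys, before x b = before' x b) :
    PySem.List.insertBy before x ys = PySem.List.insertBy before' x ys := by
  induction ys with
  | nil => rfl
  | cons b bs ih =>
      simp only [PySem.List.insertBy, h b (by simp)]
      split <;> simp [ih (fun b hb => h b (by simp [hb]))]

theorem insFold_congr {α : Type} (before before' : α → α → Bool) (xs : List α)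
    (h : ∀ a ∈ xs, ∀ b ∈ xs, before a b = before' a b) :
    insFold before xs = insFold before' xs := by
  induction xs using List.reverseRecOn with
  | nil => rfl
  | append_singleton ys x ih =>
      rw [insFold_append_singleton, insFold_append_singleton]
      rw [ih (fun a ha b hb => h a (by simp [ha]) b (by simp [hb]))]
      exact insertBy_congr _ _ _ _ (fun b hb => by
        have hb' : b ∈ ys := (mem_insFold _ _ _).1 hb
        exact h x (by simp) b (by simp [hb']))

theorem insFold_split {α : Type} (before : α → α → Bool) (p : α → Bool) (xs : List α)
    (h : ∀ a ∈ xs, ∀ b ∈ xs, p a = true → p b = false →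
          before a b = true ∧ before b a = false) :
    insFold before xs = insFold before (xs.filter p) ++ insFold before (xs.filter (fun x => !p x)) := by
  induction xs using List.reverseRecOn with
  | nil => rfl
  | append_singleton ys x ih =>
      have h' : ∀ a ∈ ys, ∀ b ∈ ys, p a = true → p b = false →
          before a b = true ∧ before b a = false :=
        fun a ha b hb => h a (by simp [ha]) b (by simp [hb])
      rw [insFold_append_singleton, ih h', List.filter_append, List.filter_append]
      by_cases hx : p x = true
      · rw [insertBy_append_of_all_before before x _ _ (fun b hb => by
          have hb1 : b ∈ List.filter (fun x => !p x) ys := (mem_insFold _ _ _).1 hb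
          have hb2 : b ∈ ys := List.mem_of_mem_filter hb1
          have hb3 : p b = false := by
            have := List.of_mem_filter hb1; simpa using this
          exact (h x (by simp) b (by simp [hb2]) hx hb3).1)]
        simp [hx, insFold_append_singleton]
      · have hx' : p x = false := by simpa using hx
        rw [insertBy_append_of_all_not_before before x _ _ (fun a ha => by
          have ha1 : a ∈ List.filter p ys := (mem_insFold _ _ _).1 ha
          have ha2 : a ∈ ys := List.mem_of_mem_filter ha1
          have ha3 : p a = true := List.of_mem_filter ha1
          exact (h a (by simp [ha2]) x (by simp) ha3 hx').2)]
        simp [hx', insFold_append_singleton]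

-- the first component of A's sort key, abstracted over the modality's order list
def idxKey (L : List String) (v : String) : Int :=
  match PySem.List.index? L v with
  | some i => (i : Int)
  | none => 999

theorem idxKey_cons_self (c : String) (L : List String) : idxKey (c :: L) c = 0 := by
  simp [idxKey, PySem.List.index?, List.idxOf?_cons]

theorem idxKey_mem (v : String) (L : List String) (hv : v ∈ L) :
    ∃ i : Nat, PySem.List.index? L v = some i := by
  simp only [PySem.List.index?]
  have : v ∈ L ↔ (List.idxOf? v L).isSome := (List.isSome_idxOf?).symm
  rcases Option.isSome_iff_exists.1 (this.1 hv) with ⟨i, hi⟩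
  exact ⟨i, hi⟩

theorem idxKey_cons_of_ne (v c : String) (L : List String) (hne : v ≠ c) (hv : v ∈ L) :
    idxKey (c :: L) v = idxKey L v + 1 ∧ 0 ≤ idxKey L v := by
  rcases idxKey_mem v L hv with ⟨i, hi⟩
  have hcv : ¬ (c = v) := fun h => hne h.symm
  simp [idxKey, PySem.List.index?, List.idxOf?_cons, hcv] at *
  simp [hi]

-- MAIN: insertion sort under the composite (index-in-L, name) key of the elements whose
-- component is in L  =  concatenation over L of the per-component buckets sorted by name
theorem main_lemma {α : Type} (f g : α → String) (xs : List α) :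
    ∀ (L : List String), L.Nodup →
    insFold (lt2 (fun p => idxKey L (f p)) g) (xs.filter (fun p => L.contains (f p)))
      = L.flatMap (fun cid => PySem.List.sorted (xs.filter (fun p => f p == cid)) g) := by
  intro L
  induction L with
  | nil => intro _; simp [insFold]
  | cons c L' ih =>
      intro hnd
      have hc : c ∉ L' := (List.nodup_cons.1 hnd).1
      have hnd' : L'.Nodup := (List.nodup_cons.1 hnd).2
      set k1 : α → Int := fun p => idxKey (c :: L') (f p) with hk1
      -- the element facts
      have hmem : ∀ a, a ∈ xs.filter (fun p => (c :: L').contains (f p)) →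
          f a = c ∨ (f a ∈ L' ∧ f a ≠ c) := by
        intro a ha
        have := List.of_mem_filter ha
        simp only [List.contains_cons] at this
        rcases Bool.or_eq_true_iff.1 this with h1 | h1
        · left; exact (beq_iff_eq).1 h1
        · have hfa : f a ∈ L' := by simpa [List.contains_iff_mem] using h1
          by_cases he : f a = c
          · left; exact he
          · right; exact ⟨hfa, he⟩
      -- split off the f = c bucket
      rw [insFold_split (lt2 k1 g) (fun a => f a == c) _ (by
        intro a ha b hb hpa hpb
        have hfa : f a = c := (beq_iff_eq).1 hpa
        have hfb : f b ≠ c := by simpa using hpb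
        have hfbL : f b ∈ L' := by
          rcases hmem b hb with h | h
          · exact absurd h hfb
          · exact h.1
        have ha0 : k1 a = 0 := by simp [hk1, hfa, idxKey_cons_self]
        rcases idxKey_cons_of_ne (f b) c L' hfb hfbL with ⟨hb1, hb2⟩
        have hbpos : 0 < k1 b := by simp [hk1, hb1]; omega
        constructor
        · simp [lt2, ha0, hbpos]
        · simp [lt2, ha0, hbpos]
          omega)]
      -- first chunk: the c-bucket, sorted by name only
      have hbucket : (xs.filter (fun p => (c :: L').contains (f p))).filter (fun a => f a == c)
          = xs.filter (fun p => f p == c) := by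
        rw [List.filter_filter]
        exact List.filter_congr (fun a _ => by
          by_cases h : f a = c <;> simp [h])
      have hchunk1 : insFold (lt2 k1 g) (xs.filter (fun p => f p == c))
          = PySem.List.sorted (xs.filter (fun p => f p == c)) g := by
        rw [sorted_eq_insFold]
        exact insFold_congr _ _ _ (fun a ha b hb => by
          have hfa : f a = c := by simpa using List.of_mem_filter ha
          have hfb : f b = c := by simpa using List.of_mem_filter hb
          simp [lt2, hk1, hfa, hfb, idxKey_cons_self])
      -- second chunk: the rest is the problem for L'
      have hrest : (xs.filter (fun p => (c :: L').contains (f p))).filter (fun a => !(f a == c))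
          = xs.filter (fun p => L'.contains (f p)) := by
        rw [List.filter_filter]
        exact List.filter_congr (fun a _ => by
          by_cases h : f a = c
          · simp [h, hc]
          · simp [h])
      have hchunk2 : insFold (lt2 k1 g) (xs.filter (fun p => L'.contains (f p)))
          = insFold (lt2 (fun p => idxKey L' (f p)) g) (xs.filter (fun p => L'.contains (f p))) :=
        insFold_congr _ _ _ (fun a ha b hb => by
          have hfa : f a ∈ L' := by
            simpa [List.contains_iff_mem] using List.of_mem_filter ha
          have hfb : f b ∈ L' := by
            simpa [List.contains_iff_mem] using List.of_mem_filter hb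
          have hac : f a ≠ c := fun h => hc (h ▸ hfa)
          have hbc : f b ≠ c := fun h => hc (h ▸ hfb)
          rcases idxKey_cons_of_ne (f a) c L' hac hfa with ⟨ha1, _⟩
          rcases idxKey_cons_of_ne (f b) c L' hbc hfb with ⟨hb1, _⟩
          simp only [lt2, hk1, ha1, hb1, add_lt_add_iff_right])
      rw [hbucket, hrest, hchunk1, hchunk2, ih hnd']
      simp [List.flatMap_cons]

-- every order list stored in the modality table has no duplicates
theorem orden_nodup (k : String) (L : List String)
    (h : PySem.Dict.get? ORDEN_COMPONENTES_POR_MODALIDAD k = some L) : L.Nodup := by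
  simp only [PySem.Dict.get?, ORDEN_COMPONENTES_POR_MODALIDAD, List.find?] at h
  repeat' split at h
  all_goals simp_all
  all_goals subst h
  all_goals decide

-- ===== VERDICT (by name: the statement is the Claim_ definition above) =====
theorem sort_preparaciones_dicts_spec : Claim_equal_sort_preparaciones_dicts := by
  intro xs mid _dom
  unfold Spec_sort_preparaciones_dicts sort_preparaciones_dicts sort_preparaciones_dicts_alt
  cases h : PySem.Dict.get? ORDEN_COMPONENTES_POR_MODALIDAD (pvOrStr mid) with
  | none =>
      simp only [pvOrStr_eq] at h
      -- no defined order: every index is 999, so the composite key degenerates to the name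
      have h999 : ∀ p : List (String × String),
          indice_componente (PySem.Dict.getD (PySem.Dict.mk p) "id_componente_id" "") mid = 999 := by
        intro p
        simp [indice_componente, PySem.Dict.getD, h, PySem.List.index?]
      simp only [sorted2_eq_insFold, sorted_eq_insFold, nombreKeyA_eq_B]
      exact insFold_congr _ _ _ (fun a _ b _ => by simp [lt2, h999])
  | some L =>
      simp only [pvOrStr_eq] at h
      have hnd : L.Nodup := orden_nodup _ _ h
      have hgetD : PySem.Dict.getD ORDEN_COMPONENTES_POR_MODALIDAD mid [] = L := by
        simp [PySem.Dict.getD, h]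
      have hidx : ∀ p : List (String × String),
          indice_componente (PySem.Dict.getD (PySem.Dict.mk p) "id_componente_id" "") mid
            = idxKey L (compKeyB p) := by
        intro p
        simp [indice_componente, hgetD, idxKey, compKeyB]
      simp only [sorted2_eq_insFold, nombreKeyA_eq_B]
      have hfoldB := PySem.List.foldl_append_eq_flatMap
        (fun cid => PySem.List.sorted (xs.filter (fun p => compKeyB p == cid)) nombreKeyB) L ([] : List (List (String × String)))
      rw [hfoldB, List.nil_append]
      have hfilter : xs.filter (fun p =>
            L.contains (pvOrStr (PySem.Dict.getD (PySem.Dict.mk p) "id_componente_id" "")))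
          = xs.filter (fun p => L.contains (compKeyB p)) := by
        simp [compKeyB]
      have hmain := main_lemma compKeyB nombreKeyB xs L hnd
      rw [hfilter]
      calc insFold (lt2 (fun p => indice_componente (PySem.Dict.getD (PySem.Dict.mk p) "id_componente_id" "") mid) nombreKeyB)
            (xs.filter (fun p => L.contains (compKeyB p)))
          = insFold (lt2 (fun p => idxKey L (compKeyB p)) nombreKeyB)
            (xs.filter (fun p => L.contains (compKeyB p))) :=
            insFold_congr _ _ _ (fun a _ b _ => by simp [lt2, hidx])
        _ = _ := hmain
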